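-- pv_equiv track=rewrite | github.com/pypi-data/pypi-mirror-397 | packages/hicompass/hicompass-1.0.0.tar.gz/hicompass-1.0.0/hicompass/preprocess/hic_norm.py | _get_chr_stack
-- ===== SOURCE A (Python) =====
-- from typing import Dict, List, Optional, Union
--
-- def _get_chr_stack(
--     chr_list: List[str],
--     chr_name: str,
--     chrom_sizes: Dict[str, int],
--     resolution: int
-- ) -> int:
--     """Get cumulative bin offset for a chromosome."""
--     chr_before_list = chr_list[:chr_list.index(chr_name)]
--     if len(chr_before_list) == 0:
--         return 0
--
--     stack = 0
--     for before_chr in chr_before_list: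
--         stack += int(chrom_sizes[before_chr] / resolution) + 1
--     return stack
-- ===== SOURCE B (Python) =====
-- def _get_chr_stack(chr_list, chr_name, chrom_sizes, resolution):
--     """Get cumulative bin offset for a chromosome.
--
--     Recursive decomposition: the offset of chr_name within (c :: rest) is 0 if
--     c is the target, else c's bin count plus the offset within rest."""
--     head = chr_list[0]
--     if head == chr_name:
--         return 0
--     return int(chrom_sizes[head] / resolution) + 1 + _get_chr_stack(
--         chr_list[1:], chr_name, chrom_sizes, resolution)
-- ===== Notes on version B (the rewrite author's own statement) =====
-- stated objective: alternative
-- what changed: B replaces A's .index scan + slice + accumulator loop by a structural recursion on the list with no accumulator: the offset is defined as head's bin count plus the recursive offset in the tail, summed on the way back out of the recursion.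
import Mathlib
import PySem

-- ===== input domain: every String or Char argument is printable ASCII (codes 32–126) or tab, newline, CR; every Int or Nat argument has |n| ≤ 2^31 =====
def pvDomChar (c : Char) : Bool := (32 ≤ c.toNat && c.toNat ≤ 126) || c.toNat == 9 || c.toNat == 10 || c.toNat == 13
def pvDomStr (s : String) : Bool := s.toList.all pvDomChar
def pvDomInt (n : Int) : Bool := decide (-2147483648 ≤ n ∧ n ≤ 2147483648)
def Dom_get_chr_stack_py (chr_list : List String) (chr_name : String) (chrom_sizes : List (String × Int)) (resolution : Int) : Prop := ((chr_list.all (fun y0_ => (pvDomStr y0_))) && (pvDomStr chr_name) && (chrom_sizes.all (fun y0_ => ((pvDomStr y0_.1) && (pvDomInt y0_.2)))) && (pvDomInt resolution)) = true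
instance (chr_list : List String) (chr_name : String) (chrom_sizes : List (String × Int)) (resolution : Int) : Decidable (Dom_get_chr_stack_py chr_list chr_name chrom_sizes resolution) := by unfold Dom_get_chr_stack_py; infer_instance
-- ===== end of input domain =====

-- B replaces A's index-scan + slice + accumulator loop by a structural recursion with no accumulator (objective: alternative; return value only).


-- ===== PORT A =====
-- int(x / r) is Python true division then truncation toward zero; on Dom (|x|,|r| ≤ 2^31) the
-- float division is accurate enough that the truncated result equals exact Int.tdiv.
def get_chr_stack_py (chr_list : List String) (chr_name : String) (chrom_sizes : List (String × Int)) (resolution : Int) : Int :=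
  let chr_before_list :=
    PySem.List.slice chr_list (some 0) (some (((PySem.List.index? chr_list chr_name).getD 0 : Nat) : Int))
  if chr_before_list.length = 0 then 0
  else
    chr_before_list.foldl
      (fun stack before_chr =>
        stack + (PySem.Dict.getD (PySem.Dict.mk chrom_sizes) before_chr 0).tdiv resolution + 1)
      0

-- ===== PORT B =====
-- Structural recursion, no accumulator: head's bin count plus the offset in the tail.
def altRec (chr_name : String) (chrom_sizes : List (String × Int)) (resolution : Int) : List String → Int
  | [] => 0  -- Python B raises IndexError here; unreachable under Pre_
  | c :: rest =>
    if c == chr_name then 0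
    else (PySem.Dict.getD (PySem.Dict.mk chrom_sizes) c 0).tdiv resolution + 1
          + altRec chr_name chrom_sizes resolution rest

def get_chr_stack_py_alt (chr_list : List String) (chr_name : String) (chrom_sizes : List (String × Int)) (resolution : Int) : Int :=
  altRec chr_name chrom_sizes resolution chr_list

-- ===== PRECONDITION & SPEC =====
-- Pre_ admits exactly the inputs on which A returns: chr_name occurs in chr_list (else .index raises
-- ValueError), every chromosome before its first occurrence is a key of chrom_sizes (else KeyError),
-- and resolution ≠ 0 when that prefix is nonempty (else ZeroDivisionError).
def Pre_get_chr_stack_py (chr_list : List String) (chr_name : String) (chrom_sizes : List (String × Int)) (resolution : Int) : Prop :=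
  chr_name ∈ chr_list ∧
  (∀ c ∈ chr_list.takeWhile (fun x => x != chr_name), c ∈ chrom_sizes.map Prod.fst) ∧
  (chr_list.takeWhile (fun x => x != chr_name) = [] ∨ resolution ≠ 0)
instance (chr_list : List String) (chr_name : String) (chrom_sizes : List (String × Int)) (resolution : Int) : Decidable (Pre_get_chr_stack_py chr_list chr_name chrom_sizes resolution) := by unfold Pre_get_chr_stack_py; infer_instance

def pvWitness_get_chr_stack_py : List String × String × (List (String × Int)) × Int :=
  (["chr1", "chr2", "chr3"], "chr3", [("chr1", 20), ("chr2", 13)], 5)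

def Spec_get_chr_stack_py (chr_list : List String) (chr_name : String) (chrom_sizes : List (String × Int)) (resolution : Int) (out : Int) : Prop := out = get_chr_stack_py_alt chr_list chr_name chrom_sizes resolution
instance (chr_list : List String) (chr_name : String) (chrom_sizes : List (String × Int)) (resolution : Int) (out : Int) : Decidable (Spec_get_chr_stack_py chr_list chr_name chrom_sizes resolution out) := by unfold Spec_get_chr_stack_py; infer_instance

-- ===== CLAIM (what is proved, stated in full; the proofs are below) =====
def Claim_equal_get_chr_stack_py : Prop := ∀ (chr_list : List String) (chr_name : String) (chrom_sizes : List (String × Int)) (resolution : Int), Dom_get_chr_stack_py chr_list chr_name chrom_sizes resolution → Pre_get_chr_stack_py chr_list chr_name chrom_sizes resolution → Spec_get_chr_stack_py chr_list chr_name chrom_sizes resolution (get_chr_stack_py chr_list chr_name chrom_sizes resolution)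

-- ===== LEMMAS AND PROOFS =====

-- Under membership, A's slice prefix is the takeWhile prefix.
theorem take_index_eq_takeWhile (chr_list : List String) (chr_name : String)
    (h : chr_name ∈ chr_list) :
    chr_list.take ((PySem.List.index? chr_list chr_name).getD 0) =
      chr_list.takeWhile (fun x => x != chr_name) := by
  induction chr_list with
  | nil => cases h
  | cons c rest ih =>
    by_cases hc : c = chr_name
    · subst hc
      rw [PySem.List.index?_cons_self]
      simp
    · have hmem : chr_name ∈ rest := by
        cases h with
        | head => exact absurd rfl hc
        | tail _ h' => exact h'
      rw [PySem.List.index?_cons_of_ne rest hc]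
      obtain ⟨k, hk⟩ := Option.isSome_iff_exists.mp
        ((PySem.List.index?_isSome_iff rest chr_name).mpr hmem)
      rw [hk]
      simp only [Option.map_some, Option.getD_some, List.take_succ_cons]
      have : (c != chr_name) = true := by simp [hc]
      simp only [List.takeWhile_cons, this, if_true]
      have := ih hmem
      rw [hk] at this
      simp only [Option.getD_some] at this
      rw [this]

-- A's fold of the step over the takeWhile prefix, started at s, equals s plus B's recursion,
-- when chr_name occurs in the list.
theorem foldl_takeWhile_eq_altRec (chr_name : String) (chrom_sizes : List (String × Int))
    (resolution : Int) (chr_list : List String) (s : Int) (h : chr_name ∈ chr_list) :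
    (chr_list.takeWhile (fun x => x != chr_name)).foldl
        (fun stack c => stack + (PySem.Dict.getD (PySem.Dict.mk chrom_sizes) c 0).tdiv resolution + 1) s
      = s + altRec chr_name chrom_sizes resolution chr_list := by
  induction chr_list generalizing s with
  | nil => cases h
  | cons c rest ih =>
    by_cases hc : c = chr_name
    · subst hc
      simp [altRec]
    · have hmem : chr_name ∈ rest := by
        cases h with
        | head => exact absurd rfl hc
        | tail _ h' => exact h'
      have hb : (c != chr_name) = true := by simp [hc]
      simp only [List.takeWhile_cons, hb, if_true, List.foldl_cons]
      rw [ih _ hmem]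
      simp only [altRec, beq_iff_eq, if_neg hc]
      ring

-- ===== VERDICT (by name: the statement is the Claim_ definition above) =====
theorem get_chr_stack_py_spec : Claim_equal_get_chr_stack_py := by
  intro chr_list chr_name chrom_sizes resolution _hdom hpre
  obtain ⟨hmem, -, -⟩ := hpre
  unfold Spec_get_chr_stack_py get_chr_stack_py get_chr_stack_py_alt
  simp only [PySem.List.slice_zero_start, PySem.List.slice_to_natCast,
    take_index_eq_takeWhile chr_list chr_name hmem]
  split_ifs with h0
  · -- empty prefix: the list starts with chr_name, so altRec returns 0 immediately
    rw [List.length_eq_zero_iff] at h0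
    cases chr_list with
    | nil => cases hmem
    | cons c rest =>
      have hc : c = chr_name := by
        by_contra hne
        have : (c != chr_name) = true := by simp [hne]
        simp [this] at h0
      simp [altRec, hc]
  · rw [foldl_takeWhile_eq_altRec _ _ _ _ _ hmem]
    ring
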